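-- pv_equiv track=rewrite | github.com/h-shawn/SAT-Solver-CDCL | preprocessor.py | subsumption_eliminate
-- ===== SOURCE A (Python) =====
-- def subsumption_eliminate(clauses, num_vars):
--     appearance = {}
--     for i in range(1, num_vars + 1):
--         appearance[i] = set()
--         appearance[-i] = set()
--     for i, c in enumerate(clauses):
--         for lit in c:
--             appearance[lit].add(i)
--     for i, c in enumerate(clauses):
--         if c == None:
--             continue
--         subsumed = appearance[c[0]].copy()
--         for lit in c:
--             subsumed.intersection_update(appearance[lit])
--         subsumed.remove(i)
--         if len(subsumed) > 0:
--             # This clause subsumes other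
--             for sc in subsumed:
--                 clauses[sc] = None
--     ret = []
--     for c in clauses:
--         if c is not None:
--             ret.append(c)
--     return ret, appearance
-- ===== SOURCE B (Python) =====
-- def subsumption_eliminate(clauses, num_vars):
--     # Same inverted index (part of the return value).
--     appearance = {}
--     for v in range(1, num_vars + 1):
--         appearance[v] = set()
--         appearance[-v] = set()
--     for i, c in enumerate(clauses):
--         for lit in c:
--             appearance[lit].add(i)
--     # Direct subset tests on precomputed literal sets instead of
--     # intersecting appearance postings.
--     lit_sets = [set(c) for c in clauses]
--     n = len(clauses)
--     for i in range(n):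
--         if clauses[i] is None:
--             continue
--         s = lit_sets[i]
--         for j in range(n):
--             if j != i and s <= lit_sets[j]:
--                 clauses[j] = None
--     ret = [c for c in clauses if c is not None]
--     return ret, appearance
-- ===== Notes on version B (the rewrite author's own statement) =====
-- stated objective: simpler
-- what changed: Replaces the inverted-index elimination (copying and intersecting appearance postings per literal, then removing i) by direct subset tests between precomputed clause literal sets; the appearance index is still built, but only because it is returned.
import Mathlib
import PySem

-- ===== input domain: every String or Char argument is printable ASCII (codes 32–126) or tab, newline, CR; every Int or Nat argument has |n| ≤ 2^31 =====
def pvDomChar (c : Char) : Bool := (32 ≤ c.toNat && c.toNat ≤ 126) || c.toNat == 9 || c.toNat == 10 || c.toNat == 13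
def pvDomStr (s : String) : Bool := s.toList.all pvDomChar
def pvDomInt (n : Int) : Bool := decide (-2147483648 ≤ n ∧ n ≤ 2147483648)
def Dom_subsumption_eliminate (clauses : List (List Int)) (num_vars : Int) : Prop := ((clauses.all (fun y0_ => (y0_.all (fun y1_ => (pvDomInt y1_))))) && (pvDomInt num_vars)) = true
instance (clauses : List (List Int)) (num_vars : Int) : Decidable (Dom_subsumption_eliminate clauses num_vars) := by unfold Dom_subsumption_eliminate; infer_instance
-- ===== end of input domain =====

-- B replaces A's per-clause copy/intersect/remove of inverted-index postings by direct subset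
-- tests between precomputed clause literal sets (objective: simpler elimination loop).
-- Both versions mutate `clauses` in place in Python (same marking); the theorems are about the return value.

-- ===== PORT A =====
-- appearance build (identical passage in both Python sources, so shared by both ports).
-- `appearance[lit].add(i)` is ported with Dict.modify; on a key Python would KeyError on,
-- modify inserts instead — those inputs are excluded by Pre_ below.
def pvBuildAppearance (clauses : List (List Int)) (num_vars : Int) : PySem.Dict Int (PySem.Set Int) :=
  (PySem.List.enumerate clauses).foldl
    (fun d p => p.2.foldl (fun d lit => d.modify lit PySem.Set.empty (fun s => PySem.Set.add s p.1)) d)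
    ((PySem.List.pyRange 1 (num_vars + 1) 1).foldl
      (fun d v => (d.insert v PySem.Set.empty).insert (-v) PySem.Set.empty) PySem.Dict.empty)

-- one iteration of A's elimination loop (`c[0]` is ported as headD, `subsumed.remove(i)` as
-- remove? with an identity fallback: both raise in Python only outside Pre_ below)
def pvStepA (app : PySem.Dict Int (PySem.Set Int)) (cs : List (Option (List Int))) (i : Nat) :
    List (Option (List Int)) :=
  match cs.getD i none with
  | none => cs
  | some c =>
    let subsumed := c.foldl (fun s lit => PySem.Set.inter s (app.getD lit PySem.Set.empty))
        (app.getD (c.headD 0) PySem.Set.empty)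
    let subsumed2 := (PySem.Set.remove? subsumed (i : Int)).getD subsumed
    if 0 < PySem.Set.len subsumed2 then
      subsumed2.foldl (fun cs sc => PySem.List.pySetD cs sc none) cs
    else cs

def subsumption_eliminate (clauses : List (List Int)) (num_vars : Int) :
    List (List Int) × (List (Int × List Int)) :=
  let appearance := pvBuildAppearance clauses num_vars
  let final := (List.range clauses.length).foldl (pvStepA appearance) (clauses.map some)
  (final.foldl (fun r c => match c with | some c => r ++ [c] | none => r) ([] : List (List Int)),
   appearance.items)

-- ===== PORT B =====
-- one iteration of B's elimination loop: direct subset tests on the precomputed literal sets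
def pvStepB (litSets : List (PySem.Set Int)) (n : Nat) (cs : List (Option (List Int))) (i : Nat) :
    List (Option (List Int)) :=
  match cs.getD i none with
  | none => cs
  | some _ =>
    let s := litSets.getD i PySem.Set.empty
    (List.range n).foldl
      (fun cs j => if j ≠ i ∧ PySem.Set.issubset s (litSets.getD j PySem.Set.empty) then cs.set j none else cs)
      cs

def subsumption_eliminate_alt (clauses : List (List Int)) (num_vars : Int) :
    List (List Int) × (List (Int × List Int)) :=
  let appearance := pvBuildAppearance clauses num_vars
  let litSets := clauses.map PySem.Set.ofList
  let n := clauses.length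
  let final := (List.range n).foldl (pvStepB litSets n) (clauses.map some)
  (final.filterMap id, appearance.items)

-- ===== PRECONDITION & SPEC =====
-- Pre_ excludes exactly the inputs where A raises: an empty clause (IndexError at c[0]) or a
-- literal lit with lit = 0 or |lit| > num_vars (KeyError on appearance[lit]).
def Pre_subsumption_eliminate (clauses : List (List Int)) (num_vars : Int) : Prop :=
  ∀ c ∈ clauses, c ≠ [] ∧ ∀ lit ∈ c, (1 ≤ lit ∧ lit ≤ num_vars) ∨ (-num_vars ≤ lit ∧ lit ≤ -1)
instance (clauses : List (List Int)) (num_vars : Int) : Decidable (Pre_subsumption_eliminate clauses num_vars) := by unfold Pre_subsumption_eliminate; infer_instance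
def pvWitness_subsumption_eliminate : List (List Int) × Int := ([[1], [1, 2]], 2)

def Spec_subsumption_eliminate (clauses : List (List Int)) (num_vars : Int) (out : List (List Int) × (List (Int × List Int))) : Prop := out = subsumption_eliminate_alt clauses num_vars
instance (clauses : List (List Int)) (num_vars : Int) (out : List (List Int) × (List (Int × List Int))) : Decidable (Spec_subsumption_eliminate clauses num_vars out) := by unfold Spec_subsumption_eliminate; infer_instance

-- ===== CLAIM (what is proved, stated in full; the proofs are below) =====
def Claim_equal_subsumption_eliminate : Prop := ∀ (clauses : List (List Int)) (num_vars : Int), Dom_subsumption_eliminate clauses num_vars → Pre_subsumption_eliminate clauses num_vars → Spec_subsumption_eliminate clauses num_vars (subsumption_eliminate clauses num_vars)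

-- ===== LEMMAS AND PROOFS =====

-- the state invariant of the elimination loop
def pvInv (clauses : List (List Int)) (cs : List (Option (List Int))) : Prop :=
  cs.length = clauses.length ∧ ∀ k : Nat, cs[k]? = some none ∨ cs[k]? = clauses[k]?.map some

theorem pv_getD_init (l : List Int) (d : PySem.Dict Int (PySem.Set Int))
    (h : ∀ x, d.getD x PySem.Set.empty = PySem.Set.empty) (x : Int) :
    (l.foldl (fun d v => (d.insert v PySem.Set.empty).insert (-v) PySem.Set.empty) d).getD x
      PySem.Set.empty = PySem.Set.empty := by
  induction l generalizing d with
  | nil => exact h x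
  | cons a l ih =>
    refine ih _ (fun y => ?_)
    rw [PySem.Dict.getD_insert, PySem.Dict.getD_insert]
    split_ifs <;> first | rfl | exact h y

theorem pv_inner (c : List Int) (j : Int) (d : PySem.Dict Int (PySem.Set Int)) (lit : Int) :
    (c.foldl (fun d l => d.modify l PySem.Set.empty (fun s => PySem.Set.add s j)) d).getD lit
        PySem.Set.empty
      = if lit ∈ c then PySem.Set.add (d.getD lit PySem.Set.empty) j
        else d.getD lit PySem.Set.empty := by
  induction c generalizing d with
  | nil => simp
  | cons a c ih =>
    rw [List.foldl_cons, ih]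
    rw [PySem.Dict.getD_modify]
    by_cases hac : lit ∈ c <;> by_cases hla : lit = a <;>
      simp [hac, hla]

theorem pv_outer (cl : List (List Int)) (s : Int) (d : PySem.Dict Int (PySem.Set Int)) (lit : Int) :
    ((PySem.List.enumerate cl s).foldl
        (fun d p => p.2.foldl (fun d l => d.modify l PySem.Set.empty (fun s' => PySem.Set.add s' p.1)) d) d).getD
        lit PySem.Set.empty
      = (PySem.List.enumerate cl s).foldl
          (fun v p => if lit ∈ p.2 then PySem.Set.add v p.1 else v) (d.getD lit PySem.Set.empty) := by
  induction cl generalizing s d with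
  | nil => simp [PySem.List.enumerate_nil]
  | cons c cl ih =>
    rw [PySem.List.enumerate_cons, List.foldl_cons, List.foldl_cons, ih]
    congr 1
    exact pv_inner c s d lit

theorem pv_mem_condAdd (l : List (Int × List Int)) (v : PySem.Set Int) (lit x : Int) :
    x ∈ l.foldl (fun v p => if lit ∈ p.2 then PySem.Set.add v p.1 else v) v
      ↔ x ∈ v ∨ ∃ p ∈ l, lit ∈ p.2 ∧ x = p.1 := by
  induction l generalizing v with
  | nil => simp
  | cons a l ih =>
    rw [List.foldl_cons, ih]
    by_cases h : lit ∈ a.2 <;> simp [h, PySem.Set.mem_add]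
    tauto

theorem pv_nodup_condAdd (l : List (Int × List Int)) (v : PySem.Set Int) (lit : Int)
    (h : v.Nodup) :
    (l.foldl (fun v p => if lit ∈ p.2 then PySem.Set.add v p.1 else v) v).Nodup := by
  induction l generalizing v with
  | nil => exact h
  | cons a l ih =>
    refine ih _ ?_
    by_cases h' : lit ∈ a.2
    · simpa [h'] using PySem.Set.nodup_add _ _ h
    · simpa [h'] using h

theorem pv_mem_enumerate {α : Type} (xs : List α) (s : Int) (p : Int × α) :
    p ∈ PySem.List.enumerate xs s ↔ ∃ k : Nat, ∃ h : k < xs.length, p = (s + k, xs[k]) := by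
  induction xs generalizing s with
  | nil => simp [PySem.List.enumerate_nil]
  | cons a xs ih =>
    rw [PySem.List.enumerate_cons, List.mem_cons, ih]
    constructor
    · rintro (rfl | ⟨k, hk, rfl⟩)
      · exact ⟨0, by simp, by simp⟩
      · exact ⟨k + 1, by simpa using hk, by simp; ring_nf⟩
    · rintro ⟨k, hk, rfl⟩
      cases k with
      | zero => left; simp
      | succ k => right; exact ⟨k, by simpa using hk, by simp; ring_nf⟩

theorem pv_mem_appVal (clauses : List (List Int)) (num_vars : Int) (lit x : Int) :
    x ∈ (pvBuildAppearance clauses num_vars).getD lit PySem.Set.empty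
      ↔ ∃ k : Nat, ∃ h : k < clauses.length, x = (k : Int) ∧ lit ∈ clauses[k] := by
  unfold pvBuildAppearance
  rw [pv_outer, pv_getD_init _ _ (fun y => by simp [PySem.Dict.getD_empty]),
    pv_mem_condAdd]
  simp only [PySem.Set.empty, List.not_mem_nil, false_or]
  constructor
  · rintro ⟨p, hp, hlit, rfl⟩
    obtain ⟨k, hk, rfl⟩ := (pv_mem_enumerate _ _ _).mp hp
    exact ⟨k, hk, by simp, by simpa using hlit⟩
  · rintro ⟨k, hk, rfl, hlit⟩
    exact ⟨((k : Int), clauses[k]), (pv_mem_enumerate _ _ _).mpr ⟨k, hk, by simp⟩, hlit, rfl⟩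

theorem pv_nodup_appVal (clauses : List (List Int)) (num_vars : Int) (lit : Int) :
    ((pvBuildAppearance clauses num_vars).getD lit PySem.Set.empty).Nodup := by
  unfold pvBuildAppearance
  rw [pv_outer, pv_getD_init _ _ (fun y => by simp [PySem.Dict.getD_empty])]
  exact pv_nodup_condAdd _ _ _ (by simp [PySem.Set.empty])

theorem pv_mem_interFold (c : List Int) (f : Int → PySem.Set Int) (s0 : PySem.Set Int) (x : Int) :
    x ∈ c.foldl (fun s l => PySem.Set.inter s (f l)) s0 ↔ x ∈ s0 ∧ ∀ l ∈ c, x ∈ f l := by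
  induction c generalizing s0 with
  | nil => simp
  | cons a c ih =>
    rw [List.foldl_cons, ih]
    simp [PySem.Set.mem_inter]; tauto

theorem pv_nodup_interFold (c : List Int) (f : Int → PySem.Set Int) (s0 : PySem.Set Int)
    (h : s0.Nodup) : (c.foldl (fun s l => PySem.Set.inter s (f l)) s0).Nodup := by
  induction c generalizing s0 with
  | nil => exact h
  | cons a c ih => exact ih _ (PySem.Set.nodup_inter _ _ h)

theorem pv_markA (L : List Int) (hL : ∀ x ∈ L, 0 ≤ x) (cs : List (Option (List Int))) (k : Nat) :
    (L.foldl (fun cs sc => PySem.List.pySetD cs sc none) cs)[k]?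
      = if (k : Int) ∈ L ∧ k < cs.length then some none else cs[k]? := by
  induction L generalizing cs with
  | nil => simp
  | cons sc L ih =>
    rw [List.foldl_cons, ih (fun x hx => hL x (List.mem_cons_of_mem _ hx))]
    rw [PySem.List.pySetD_of_nonneg _ _ (hL sc (List.mem_cons_self ..))]
    have h0 : (0:Int) ≤ sc := hL sc (List.mem_cons_self ..)
    simp only [List.length_set, List.getElem?_set, List.mem_cons]
    by_cases h1 : (k:Int) ∈ L ∧ k < cs.length
    · simp [h1]
    · by_cases h2 : (k:Int) = sc
      · have : sc.toNat = k := by omega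
        by_cases h3 : k < cs.length <;> simp_all
      · have : ¬ sc.toNat = k := by omega
        simp_all

theorem pv_markB (L : List Nat) (Q : Nat → Prop) [DecidablePred Q]
    (cs : List (Option (List Int))) (k : Nat) :
    (L.foldl (fun cs j => if Q j then cs.set j none else cs) cs)[k]?
      = if k ∈ L ∧ Q k ∧ k < cs.length then some none else cs[k]? := by
  induction L generalizing cs with
  | nil => simp
  | cons j L ih =>
    rw [List.foldl_cons, ih]
    by_cases hQ : Q j
    · simp only [hQ, if_true, List.length_set, List.getElem?_set, List.mem_cons]
      by_cases h1 : k ∈ L ∧ Q k ∧ k < cs.length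
      · simp [h1]
      · by_cases h2 : j = k
        · subst h2
          by_cases h3 : j < cs.length <;> simp_all
        · have h2' : ¬ k = j := fun hh => h2 hh.symm
          simp_all
    · simp only [hQ, if_false, List.mem_cons]
      by_cases h1 : k ∈ L ∧ Q k ∧ k < cs.length
      · simp [h1]
      · by_cases h2 : j = k
        · subst h2; simp_all
        · have h2' : ¬ k = j := fun hh => h2 hh.symm
          simp_all

theorem pv_markB_len (L : List Nat) (Q : Nat → Prop) [DecidablePred Q]
    (cs : List (Option (List Int))) :
    (L.foldl (fun cs j => if Q j then cs.set j none else cs) cs).length = cs.length := by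
  induction L generalizing cs with
  | nil => rfl
  | cons j L ih =>
    rw [List.foldl_cons, ih]
    split_ifs <;> simp

theorem pv_foldl_congr_inv {σ ι : Type} (P : σ → Prop) (f g : σ → ι → σ) (L : List ι) (s : σ)
    (hs : P s) (hP : ∀ s i, P s → i ∈ L → P (g s i))
    (hfg : ∀ s i, P s → i ∈ L → f s i = g s i) : L.foldl f s = L.foldl g s := by
  induction L generalizing s with
  | nil => rfl
  | cons a L ih =>
    rw [List.foldl_cons, List.foldl_cons, hfg s a hs (List.mem_cons_self ..)]
    exact ih _ (hP s a hs (List.mem_cons_self ..))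
      (fun s i h hi => hP s i h (List.mem_cons_of_mem _ hi))
      (fun s i h hi => hfg s i h (List.mem_cons_of_mem _ hi))

theorem pv_litSets_getD (clauses : List (List Int)) (j : Nat) (h : j < clauses.length) :
    (clauses.map PySem.Set.ofList).getD j PySem.Set.empty
      = PySem.Set.ofList (clauses.getD j []) := by
  simp [List.getD_eq_getElem?_getD, List.getElem?_map, List.getElem?_eq_getElem h]

theorem pv_step_eq (clauses : List (List Int)) (num_vars : Int)
    (hpre : Pre_subsumption_eliminate clauses num_vars) (cs : List (Option (List Int))) (i : Nat)
    (hinv : pvInv clauses cs) (hi : i < clauses.length) :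
    pvStepA (pvBuildAppearance clauses num_vars) cs i
      = pvStepB (clauses.map PySem.Set.ofList) clauses.length cs i := by
  obtain ⟨hlen, hkinv⟩ := hinv
  unfold pvStepA pvStepB
  cases hcs : cs.getD i none with
  | none => rfl
  | some c =>
    dsimp only
    -- c is the original clause at index i
    have h1 : cs[i]? = some (some c) := by
      have h2 := List.getD_eq_getElem?_getD (l := cs) (i := i) (a := (none : Option (List Int)))
      rw [hcs] at h2
      cases h3 : cs[i]? with
      | none => rw [h3] at h2; simp at h2
      | some v => rw [h3] at h2; simp at h2; rw [h2]
    have hceq : c = clauses[i] := by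
      rcases hkinv i with h | h
      · rw [h1] at h; simp at h
      · rw [h1, List.getElem?_eq_getElem hi] at h; simpa using h
    have hcmem : c ∈ clauses := hceq ▸ List.getElem_mem hi
    have hcne : c ≠ [] := (hpre c hcmem).1
    have hheadmem : c.headD 0 ∈ c := by
      cases c with
      | nil => exact absurd rfl hcne
      | cons a t => exact List.mem_cons_self ..
    set app := pvBuildAppearance clauses num_vars with happ
    set S := c.foldl (fun s lit => PySem.Set.inter s (app.getD lit PySem.Set.empty))
        (app.getD (c.headD 0) PySem.Set.empty) with hS
    have hmemS : ∀ x, x ∈ S ↔ ∀ l ∈ c, x ∈ app.getD l PySem.Set.empty := by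
      intro x
      rw [hS, pv_mem_interFold]
      exact ⟨fun h => h.2, fun h => ⟨h _ hheadmem, h⟩⟩
    have hiS : (i : Int) ∈ S :=
      (hmemS _).mpr fun l hl => (pv_mem_appVal clauses num_vars l i).mpr
        ⟨i, hi, rfl, hceq ▸ hl⟩
    have hnodupS : S.Nodup :=
      pv_nodup_interFold _ _ _ (pv_nodup_appVal clauses num_vars _)
    rw [PySem.Set.remove?_of_mem hiS, Option.getD_some]
    have hgetD : ∀ (k : Nat) (hk : k < clauses.length), clauses.getD k [] = clauses[k] :=
      fun k hk => by rw [List.getD_eq_getElem?_getD, List.getElem?_eq_getElem hk]; rfl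
    -- membership in the marked set, at Nat indices
    have hmem2 : ∀ k : Nat, ((k : Int) ∈ S.discard (i : Int)
        ↔ k ≠ i ∧ k < clauses.length ∧ ∀ l ∈ c, l ∈ clauses.getD k []) := by
      intro k
      rw [PySem.Set.mem_discard, hmemS]
      constructor
      · rintro ⟨hall, hne⟩
        have hne' : k ≠ i := fun hh => hne (by exact_mod_cast hh)
        obtain ⟨l0, hl0⟩ := List.exists_mem_of_ne_nil c hcne
        obtain ⟨k', hk', he, -⟩ := (pv_mem_appVal clauses num_vars l0 k).mp (hall l0 hl0)
        have h4 : k = k' := by exact_mod_cast he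
        have hky : k < clauses.length := h4 ▸ hk'
        refine ⟨hne', hky, fun l hl' => ?_⟩
        obtain ⟨k'', hk'', he'', hl''⟩ := (pv_mem_appVal clauses num_vars l k).mp (hall l hl')
        have h5 : k = k'' := by exact_mod_cast he''
        have h6 : l ∈ clauses.getD k'' [] := by rw [hgetD k'' hk'']; exact hl''
        rw [← h5] at h6
        exact h6
      · rintro ⟨hne, hky, hall⟩
        refine ⟨fun l hl => (pv_mem_appVal clauses num_vars l k).mpr ⟨k, hky, rfl, ?_⟩,
          fun hh => hne (by exact_mod_cast hh)⟩
        have h7 := hall l hl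
        rw [hgetD k hky] at h7
        exact h7
    have hnonneg : ∀ x ∈ S.discard (i : Int), 0 ≤ x := by
      intro x hx
      obtain ⟨hall, -⟩ := (PySem.Set.mem_discard _ _ _).mp hx
      rw [hmemS] at hall
      obtain ⟨l0, hl0⟩ := List.exists_mem_of_ne_nil c hcne
      obtain ⟨k', hk', he, -⟩ := (pv_mem_appVal clauses num_vars l0 x).mp (hall l0 hl0)
      omega
    -- the B-side subset condition at a valid index
    have hQ : ∀ (k : Nat) (hk : k < clauses.length),
        ((PySem.Set.issubset ((clauses.map PySem.Set.ofList).getD i PySem.Set.empty)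
          ((clauses.map PySem.Set.ofList).getD k PySem.Set.empty) = true)
          ↔ ∀ l ∈ c, l ∈ clauses.getD k []) := by
      intro k hk
      rw [pv_litSets_getD _ _ hi, pv_litSets_getD _ _ hk, PySem.Set.issubset_iff]
      have hci : clauses.getD i [] = c := by rw [hgetD i hi]; exact hceq.symm
      rw [hci]
      constructor
      · intro h l hl
        exact (PySem.Set.mem_ofList _ _).mp (h l ((PySem.Set.mem_ofList _ _).mpr hl))
      · intro h l hl
        exact (PySem.Set.mem_ofList _ _).mpr (h l ((PySem.Set.mem_ofList _ _).mp hl))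
    refine List.ext_getElem? fun k => ?_
    rw [pv_markB]
    split_ifs with hlenS hB hB
    · -- nonempty marked set on the A side
      rw [pv_markA _ hnonneg]
      rw [if_pos]
      obtain ⟨hkr, hkQ, hklen⟩ := hB
      refine ⟨(hmem2 k).mpr ⟨hkQ.1, List.mem_range.mp hkr, (hQ k (List.mem_range.mp hkr)).mp hkQ.2⟩, hklen⟩
    · rw [pv_markA _ hnonneg]
      rw [if_neg]
      rintro ⟨hkmem, hklen⟩
      obtain ⟨hne, hk, hall⟩ := (hmem2 k).mp hkmem
      exact hB ⟨List.mem_range.mpr hk, ⟨hne, (hQ k hk).mpr hall⟩, hklen⟩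
    · -- empty marked set: A leaves cs unchanged, but B's condition would give a member
      exfalso
      obtain ⟨hkr, hkQ, hklen⟩ := hB
      have : (k : Int) ∈ S.discard (i : Int) :=
        (hmem2 k).mpr ⟨hkQ.1, List.mem_range.mp hkr, (hQ k (List.mem_range.mp hkr)).mp hkQ.2⟩
      have hempty : (S.discard (i : Int)).length = 0 := by
        simp only [PySem.Set.len] at hlenS
        omega
      rw [List.length_eq_zero_iff] at hempty
      rw [hempty] at this
      exact List.not_mem_nil this
    · rfl

theorem pv_stepB_inv (clauses : List (List Int)) (litSets : List (PySem.Set Int)) (n : Nat)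
    (cs : List (Option (List Int))) (i : Nat) (hinv : pvInv clauses cs) :
    pvInv clauses (pvStepB litSets n cs i) := by
  obtain ⟨hlen, hk⟩ := hinv
  unfold pvStepB
  cases hcs : cs.getD i none with
  | none => exact ⟨hlen, hk⟩
  | some c =>
    dsimp only
    refine ⟨by rw [pv_markB_len]; exact hlen, fun k => ?_⟩
    rw [pv_markB]
    split_ifs with h
    · exact Or.inl rfl
    · exact hk k

theorem pv_retA (l : List (Option (List Int))) (r : List (List Int)) :
    l.foldl (fun r c => match c with | some c => r ++ [c] | none => r) r = r ++ l.filterMap id := by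
  induction l generalizing r with
  | nil => simp
  | cons a l ih =>
    cases a <;> simp [List.foldl_cons, ih]

-- ===== VERDICT (by name: the statement is the Claim_ definition above) =====
theorem subsumption_eliminate_spec : Claim_equal_subsumption_eliminate := by
  intro clauses num_vars _ hpre
  unfold Spec_subsumption_eliminate subsumption_eliminate subsumption_eliminate_alt
  have h0 : pvInv clauses (clauses.map some) :=
    ⟨by simp, fun k => Or.inr (by simp [List.getElem?_map])⟩
  have hfold := pv_foldl_congr_inv (pvInv clauses)
      (pvStepA (pvBuildAppearance clauses num_vars))
      (pvStepB (clauses.map PySem.Set.ofList) clauses.length)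
      (List.range clauses.length) (clauses.map some) h0
      (fun s i hP _ => pv_stepB_inv clauses _ _ s i hP)
      (fun s i hP hi => pv_step_eq clauses num_vars hpre s i hP (List.mem_range.mp hi))
  dsimp only
  rw [hfold, pv_retA]
  simp
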